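-- pv_equiv track=rewrite | github.com/PureStream108/PureWaf | src/bypass.py | _wildcard_bypass
-- ===== SOURCE A (Python) =====
-- def _wildcard_bypass(path: str):
--     """
--     使用通配符替换路径中的部分字符
--     Replace characters in path with wildcards
--     """
--     if not path or path == "/":
--         return path
--     parts = path.split("/")
--     new_parts = []
--     for p in parts:
--         if len(p) > 1:
--             new_parts.append(p[0] + "?" * (len(p) - 1))
--         else:
--             new_parts.append(p)
--     return "/".join(new_parts)
-- ===== SOURCE B (Python) =====
-- def _wildcard_bypass(path: str):
--     """
--     Replace characters in path with wildcards.
--     One pass: a character becomes '?' unless it is a '/' separator or the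
--     first character of its segment (i.e. the previous character was '/').
--     """
--     out = []
--     prev = "/"
--     for c in path:
--         out.append(c if c == "/" or prev == "/" else "?")
--         prev = c
--     return "".join(out)
-- ===== Notes on version B (the rewrite author's own statement) =====
-- stated objective: simpler
-- what changed: Replaced the split('/') / per-segment rebuild / join('/') pipeline with a single character-by-character pass that keeps a char iff it is '/' or follows a '/', with no early-return guard needed.
import Mathlib
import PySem

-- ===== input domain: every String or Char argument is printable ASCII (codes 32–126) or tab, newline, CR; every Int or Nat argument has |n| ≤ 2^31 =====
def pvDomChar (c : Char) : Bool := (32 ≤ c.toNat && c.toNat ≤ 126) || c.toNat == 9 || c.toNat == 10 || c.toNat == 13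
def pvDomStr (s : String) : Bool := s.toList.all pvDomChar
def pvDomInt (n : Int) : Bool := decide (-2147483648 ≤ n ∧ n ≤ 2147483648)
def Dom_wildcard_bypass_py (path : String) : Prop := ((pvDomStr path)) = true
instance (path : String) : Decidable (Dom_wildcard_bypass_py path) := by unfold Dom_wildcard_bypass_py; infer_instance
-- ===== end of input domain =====

-- B replaces A's split('/')/rebuild/join('/') pipeline with a single character pass
-- (keep a char iff it is '/' or follows a '/'); objective: simpler.


-- ===== PORT A =====
def wildcard_bypass_py (path : String) : String :=
  if path = "" ∨ path = "/" then path
  else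
    let parts := PySem.Chars.splitOn path.toList ['/']
    let newParts := parts.foldl (fun acc p =>
      if 1 < p.length then acc ++ [p.take 1 ++ List.replicate (p.length - 1) '?']
      else acc ++ [p]) ([] : List (List Char))
    String.ofList (PySem.Chars.join ['/'] newParts)

-- ===== PORT B =====
def wildcard_bypass_py_alt (path : String) : String :=
  let st := path.toList.foldl
    (fun (st : List Char × Char) c =>
      (st.1 ++ [if c = '/' ∨ st.2 = '/' then c else '?'], c))
    (([] : List Char), '/')
  String.ofList st.1

-- ===== PRECONDITION & SPEC =====
def Spec_wildcard_bypass_py (path : String) (out : String) : Prop := out = wildcard_bypass_py_alt path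
instance (path : String) (out : String) : Decidable (Spec_wildcard_bypass_py path out) := by unfold Spec_wildcard_bypass_py; infer_instance

-- ===== CLAIM (what is proved, stated in full; the proofs are below) =====
def Claim_equal_wildcard_bypass_py : Prop := ∀ (path : String), Dom_wildcard_bypass_py path → Spec_wildcard_bypass_py path (wildcard_bypass_py path)

-- ===== LEMMAS AND PROOFS =====

theorem modifyHead_id' (l : List (List Char)) : List.modifyHead (fun x => x) l = l := by cases l <;> simp

-- structural form of B's single pass (prev = previous character, initially '/')
def bspec : Char → List Char → List Char
  | _, [] => []
  | prev, c :: cs => (if c = '/' ∨ prev = '/' then c else '?') :: bspec c cs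

-- A's per-segment transformation
def trSeg (p : List Char) : List Char :=
  if 1 < p.length then p.take 1 ++ List.replicate (p.length - 1) '?' else p

-- the joined tail segments, each preceded by its '/' separator
def gTail (t : List (List Char)) : List Char := t.flatMap (fun p => '/' :: trSeg p)

theorem go_eq (fuel : Nat) : ∀ (l cur : List Char) (acc : List (List Char)), l.length ≤ fuel →
    PySem.Chars.splitOn.go ['/'] fuel l cur acc
      = acc.reverse ++ (l.splitOn '/').modifyHead (cur.reverse ++ ·) := by
  induction fuel with
  | zero => intro l cur acc h
            have : l = [] := List.eq_nil_of_length_eq_zero (Nat.le_zero.mp h)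
            subst this
            simp [PySem.Chars.splitOn.go, List.splitOn]
  | succ n ih =>
    intro l cur acc h
    cases l with
    | nil => simp [PySem.Chars.splitOn.go, List.splitOn]
    | cons c rest =>
      by_cases hc : c = '/'
      · subst hc
        rw [show PySem.Chars.splitOn.go ['/'] (n+1) ('/'::rest) cur acc
              = PySem.Chars.splitOn.go ['/'] n rest [] (cur.reverse :: acc) by
            simp [PySem.Chars.splitOn.go, List.isPrefixOf]]
        rw [ih rest [] _ (by simpa using Nat.le_of_succ_le_succ h)]
        simp [List.splitOn, List.splitOnP_cons, modifyHead_id']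
      · rw [show PySem.Chars.splitOn.go ['/'] (n+1) (c::rest) cur acc
              = PySem.Chars.splitOn.go ['/'] n rest (c :: cur) acc by
            simp [PySem.Chars.splitOn.go, List.isPrefixOf]
            intro hcc; exact absurd hcc.symm hc]
        rw [ih rest (c::cur) _ (by simpa using Nat.le_of_succ_le_succ h)]
        have hne := List.splitOnP_ne_nil (fun x => x == '/') rest
        obtain ⟨h0, t0, he⟩ := List.exists_cons_of_ne_nil hne
        simp [List.splitOn, List.splitOnP_cons, hc] at he ⊢
        rw [he]
        simp

theorem splitOn_bridge (cs : List Char) :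
    PySem.Chars.splitOn cs ['/'] = cs.splitOn '/' := by
  rw [PySem.Chars.splitOn, go_eq (cs.length+1) cs [] [] (by omega)]
  simp [modifyHead_id']

theorem main_lemma : ∀ (cs : List Char) (h : List Char) (t : List (List Char)),
    cs.splitOn '/' = h :: t →
    (bspec '/' cs = trSeg h ++ gTail t) ∧
    (∀ prev, prev ≠ '/' → bspec prev cs = List.replicate h.length '?' ++ gTail t) := by
  intro cs
  induction cs with
  | nil => intro h t he
           simp [List.splitOn] at he
           obtain ⟨h1, h2⟩ := he
           subst h1; subst h2
           simp [bspec, trSeg, gTail]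
  | cons c rest ih =>
    intro h t he
    have hne := List.splitOnP_ne_nil (fun x => x == '/') rest
    obtain ⟨h', t', he'⟩ := List.exists_cons_of_ne_nil hne
    have he'' : rest.splitOn '/' = h' :: t' := he'
    obtain ⟨ih1, ih2⟩ := ih h' t' he''
    by_cases hc : c = '/'
    · subst hc
      rw [show ('/'::rest).splitOn '/' = [] :: rest.splitOn '/' by
          simp [List.splitOn, List.splitOnP_cons]] at he
      rw [he''] at he
      injection he with e1 e2; subst e1; subst e2
      constructor
      · simp [bspec, trSeg, gTail, ih1]
      · intro prev hp; simp [bspec, gTail, ih1]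
    · rw [show (c::rest).splitOn '/' = (rest.splitOn '/').modifyHead (c :: ·) by
          simp [List.splitOn, List.splitOnP_cons, hc]] at he
      rw [he''] at he
      simp at he
      obtain ⟨e1, e2⟩ := he; subst e1; subst e2
      have htr : trSeg (c :: h') = c :: List.replicate h'.length '?' := by
        cases h' with
        | nil => simp [trSeg]
        | cons x xs => simp [trSeg, List.replicate]
      constructor
      · simp [bspec, hc, ih2 c hc, htr]
      · intro prev hp
        simp [bspec, hc, hp, ih2 c hc, List.replicate]

-- B's foldl over (out, prev) computes bspec
theorem foldB (cs : List Char) : ∀ (out : List Char) (prev : Char),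
    (cs.foldl (fun (st : List Char × Char) c =>
      (st.1 ++ [if c = '/' ∨ st.2 = '/' then c else '?'], c)) (out, prev)).1
      = out ++ bspec prev cs := by
  induction cs with
  | nil => intro out prev; simp [bspec]
  | cons c cs ih => intro out prev; simp [List.foldl, ih, bspec]

-- A's foldl over segments maps trSeg
theorem foldA (parts : List (List Char)) : ∀ (acc : List (List Char)),
    parts.foldl (fun acc p =>
      if 1 < p.length then acc ++ [p.take 1 ++ List.replicate (p.length - 1) '?']
      else acc ++ [p]) acc = acc ++ parts.map trSeg := by
  induction parts with
  | nil => intro acc; simp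
  | cons p ps ih =>
    intro acc
    simp only [List.foldl, List.map]
    rw [ih]
    by_cases hp : 1 < p.length <;> simp [trSeg, hp]

theorem intercalate_map_tr (t : List (List Char)) : ∀ (h : List Char),
    List.intercalate ['/'] (List.map trSeg (h :: t)) = trSeg h ++ gTail t := by
  induction t with
  | nil => intro h; simp [List.intercalate, gTail]
  | cons p t' ih =>
    intro h
    simp only [List.map] at ih ⊢
    rw [show List.intercalate ['/'] (trSeg h :: trSeg p :: List.map trSeg t')
          = trSeg h ++ ['/'] ++ List.intercalate ['/'] (trSeg p :: List.map trSeg t') by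
        simp [List.intercalate], ih]
    simp [gTail]

theorem alt_eq (path : String) :
    wildcard_bypass_py_alt path = String.ofList (bspec '/' path.toList) := by
  show String.ofList (path.toList.foldl
    (fun (st : List Char × Char) c =>
      (st.1 ++ [if c = '/' ∨ st.2 = '/' then c else '?'], c)) (([] : List Char), '/')).1
      = String.ofList (bspec '/' path.toList)
  rw [foldB]; rfl

-- ===== VERDICT (by name: the statement is the Claim_ definition above) =====
theorem wildcard_bypass_py_spec : Claim_equal_wildcard_bypass_py := by
  unfold Claim_equal_wildcard_bypass_py Spec_wildcard_bypass_py
  intro path _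
  unfold wildcard_bypass_py
  split
  · rename_i hg
    rcases hg with hg | hg <;> subst hg <;> rfl
  · rw [alt_eq]
    have hne := List.splitOnP_ne_nil (fun x => x == '/') path.toList
    obtain ⟨h, t, he⟩ := List.exists_cons_of_ne_nil hne
    have he' : path.toList.splitOn '/' = h :: t := he
    have hmain := (main_lemma path.toList h t he').1
    simp only [splitOn_bridge, he', PySem.Chars.join, foldA, List.nil_append]
    rw [hmain, ← intercalate_map_tr t h]
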